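-- pv_equiv track=rewrite | github.com/mts7k9xy55-gif/ai-portability | ai_portability/report.py | _distribution_lines
-- ===== SOURCE A (Python) =====
-- from typing import Any
--
-- def _distribution_lines(rows: list[dict[str, Any]]) -> list[str]:
--     bins = [
--         ("0-19", 0, 19),
--         ("20-39", 20, 39),
--         ("40-59", 40, 59),
--         ("60-79", 60, 79),
--         ("80-100", 80, 100),
--     ]
--     lines: list[str] = []
--     for label, lower, upper in bins:
--         count = sum(lower <= row["lockin_score"] <= upper for row in rows)
--         lines.append(f"- {label}: {count}")
--     return lines
-- ===== SOURCE B (Python) =====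
-- from typing import Any
--
-- def _distribution_lines(rows: list[dict[str, Any]]) -> list[str]:
--     bins = [
--         ("0-19", 0, 19),
--         ("20-39", 20, 39),
--         ("40-59", 40, 59),
--         ("60-79", 60, 79),
--         ("80-100", 80, 100),
--     ]
--     counts = [0, 0, 0, 0, 0]
--     for row in rows:
--         score = row["lockin_score"]
--         for i, (_, lower, upper) in enumerate(bins):
--             if lower <= score <= upper:
--                 counts[i] += 1
--                 break
--     return [f"- {label}: {count}" for (label, _, _), count in zip(bins, counts)]
-- ===== Notes on version B (the rewrite author's own statement) =====
-- stated objective: faster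
-- what changed: One pass over the rows maintaining five counters (first matching bin, break), instead of five full scans of the rows (one per bin); lines are then built from zip(bins, counts).
import Mathlib
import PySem

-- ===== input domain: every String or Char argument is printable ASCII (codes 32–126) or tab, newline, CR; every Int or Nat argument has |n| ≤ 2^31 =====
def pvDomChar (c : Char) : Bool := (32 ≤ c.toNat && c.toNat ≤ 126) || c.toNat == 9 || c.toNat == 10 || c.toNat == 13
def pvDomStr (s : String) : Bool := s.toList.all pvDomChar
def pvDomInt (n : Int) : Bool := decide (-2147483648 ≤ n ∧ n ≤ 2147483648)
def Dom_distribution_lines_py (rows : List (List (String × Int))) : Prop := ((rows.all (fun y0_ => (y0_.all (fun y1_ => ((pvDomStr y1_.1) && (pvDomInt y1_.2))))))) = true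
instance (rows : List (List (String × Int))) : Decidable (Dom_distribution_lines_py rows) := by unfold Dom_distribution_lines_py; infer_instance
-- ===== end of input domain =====

-- B counts all five bins in ONE pass over the rows (first matching bin), instead of A's five scans.


-- ===== PORT A =====
-- row["lockin_score"] (KeyError if absent — excluded by Pre_; getD 0 is never used inside Pre_)
def pvScore (row : List (String × Int)) : Int :=
  ((PySem.Dict.mk row).get? "lockin_score").getD 0

def pvBins : List (String × Int × Int) :=
  [("0-19", 0, 19), ("20-39", 20, 39), ("40-59", 40, 59), ("60-79", 60, 79), ("80-100", 80, 100)]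

def distribution_lines_py (rows : List (List (String × Int))) : List String :=
  pvBins.foldl (fun lines b =>
    let count : Int := rows.foldl (fun acc row =>
      acc + (if b.2.1 ≤ pvScore row ∧ pvScore row ≤ b.2.2 then 1 else 0)) 0
    lines ++ ["- " ++ b.1 ++ ": " ++ PySem.Int.toStr count]) []

-- ===== PORT B =====
-- one pass: bump the counter of the first bin containing the score, skip the row otherwise
def pvStepB (c : Int × Int × Int × Int × Int) (s : Int) : Int × Int × Int × Int × Int :=
  if 0 ≤ s ∧ s ≤ 19 then (c.1 + 1, c.2.1, c.2.2.1, c.2.2.2.1, c.2.2.2.2)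
  else if 20 ≤ s ∧ s ≤ 39 then (c.1, c.2.1 + 1, c.2.2.1, c.2.2.2.1, c.2.2.2.2)
  else if 40 ≤ s ∧ s ≤ 59 then (c.1, c.2.1, c.2.2.1 + 1, c.2.2.2.1, c.2.2.2.2)
  else if 60 ≤ s ∧ s ≤ 79 then (c.1, c.2.1, c.2.2.1, c.2.2.2.1 + 1, c.2.2.2.2)
  else if 80 ≤ s ∧ s ≤ 100 then (c.1, c.2.1, c.2.2.1, c.2.2.2.1, c.2.2.2.2 + 1)
  else c

def distribution_lines_py_alt (rows : List (List (String × Int))) : List String :=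
  let c := rows.foldl (fun c row => pvStepB c (pvScore row)) (0, 0, 0, 0, 0)
  ["- 0-19: " ++ PySem.Int.toStr c.1,
   "- 20-39: " ++ PySem.Int.toStr c.2.1,
   "- 40-59: " ++ PySem.Int.toStr c.2.2.1,
   "- 60-79: " ++ PySem.Int.toStr c.2.2.2.1,
   "- 80-100: " ++ PySem.Int.toStr c.2.2.2.2]

-- ===== PRECONDITION & SPEC =====
-- A raises KeyError on any row missing the "lockin_score" key; exactly those inputs are excluded.
def Pre_distribution_lines_py (rows : List (List (String × Int))) : Prop :=
  ∀ row ∈ rows, ((PySem.Dict.mk row).get? "lockin_score").isSome = true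
instance (rows : List (List (String × Int))) : Decidable (Pre_distribution_lines_py rows) := by unfold Pre_distribution_lines_py; infer_instance

def pvWitness_distribution_lines_py : (List (List (String × Int))) :=
  [[("lockin_score", 7)], [("lockin_score", 85)]]

def Spec_distribution_lines_py (rows : List (List (String × Int))) (out : List String) : Prop := out = distribution_lines_py_alt rows
instance (rows : List (List (String × Int))) (out : List String) : Decidable (Spec_distribution_lines_py rows out) := by unfold Spec_distribution_lines_py; infer_instance

-- ===== CLAIM (what is proved, stated in full; the proofs are below) =====
def Claim_equal_distribution_lines_py : Prop := ∀ (rows : List (List (String × Int))), Dom_distribution_lines_py rows → Pre_distribution_lines_py rows → Spec_distribution_lines_py rows (distribution_lines_py rows)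

-- ===== LEMMAS AND PROOFS =====

def pvCnt (lo hi : Int) (rows : List (List (String × Int))) : Int :=
  (rows.map (fun row => if lo ≤ pvScore row ∧ pvScore row ≤ hi then (1:Int) else 0)).sum

theorem pvFoldB_spec (rows : List (List (String × Int))) (c : Int × Int × Int × Int × Int) :
    rows.foldl (fun c row => pvStepB c (pvScore row)) c =
      (c.1 + pvCnt 0 19 rows, c.2.1 + pvCnt 20 39 rows, c.2.2.1 + pvCnt 40 59 rows,
       c.2.2.2.1 + pvCnt 60 79 rows, c.2.2.2.2 + pvCnt 80 100 rows) := by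
  induction rows generalizing c with
  | nil => simp [pvCnt]
  | cons r rs ih =>
    rw [List.foldl_cons, ih]
    simp only [pvCnt, List.map_cons, List.sum_cons, pvStepB]
    split_ifs <;> simp only [Prod.mk.injEq] <;> and_intros <;> omega

theorem distribution_lines_py_spec : Claim_equal_distribution_lines_py := by
  intro rows _ _
  unfold Spec_distribution_lines_py distribution_lines_py distribution_lines_py_alt pvBins
  simp only [List.foldl_cons, List.foldl_nil, pvFoldB_spec, PySem.List.foldl_add, List.nil_append,
    List.cons_append, zero_add]
  rfl
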